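-- pv_equiv track=rewrite | github.com/near/indexer-agent | tools/bitmap_indexer_client.py | index_of_first_bit_in_byte_array
-- ===== SOURCE A (Python) =====
-- def index_of_first_bit_in_byte_array(bytes_array, start_bit):
--     first_bit = start_bit % 8
--     for i_byte in range(start_bit // 8, len(bytes_array)):
--         if bytes_array[i_byte] > 0:
--             for i_bit in range(first_bit, 8):
--                 if bytes_array[i_byte] & (1 << (7 - i_bit)):
--                     return i_byte * 8 + i_bit
--         first_bit = 0
--     return -1
-- ===== SOURCE B (Python) =====
-- def index_of_first_bit_in_byte_array(bytes_array, start_bit):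
--     for bit in range(start_bit, len(bytes_array) * 8):
--         byte = bytes_array[bit // 8]
--         if byte > 0 and byte & (1 << (7 - bit % 8)):
--             return bit
--     return -1
-- ===== Notes on version B (the rewrite author's own statement) =====
-- stated objective: simpler
-- what changed: Replaced the nested byte/bit loops with per-byte first_bit state by a single flat loop over bit indices, deriving the byte and bit position arithmetically from one counter.
import Mathlib
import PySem

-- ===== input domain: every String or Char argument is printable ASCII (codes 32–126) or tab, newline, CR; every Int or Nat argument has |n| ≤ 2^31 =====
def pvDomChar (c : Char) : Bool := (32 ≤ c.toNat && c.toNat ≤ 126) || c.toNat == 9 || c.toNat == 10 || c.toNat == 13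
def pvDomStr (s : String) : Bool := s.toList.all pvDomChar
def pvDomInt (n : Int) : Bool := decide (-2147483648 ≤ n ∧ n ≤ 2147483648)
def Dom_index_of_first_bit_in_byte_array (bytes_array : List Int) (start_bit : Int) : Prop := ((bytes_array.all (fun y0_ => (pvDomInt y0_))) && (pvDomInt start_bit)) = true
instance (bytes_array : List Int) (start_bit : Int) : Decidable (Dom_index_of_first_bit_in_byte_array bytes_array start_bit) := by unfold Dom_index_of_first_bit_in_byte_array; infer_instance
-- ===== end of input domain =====

-- B replaces A's nested byte/bit loops (with per-byte first_bit state) by one flat loop over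
-- bit indices, computing byte and bit position from a single counter: simpler decomposition.


-- ===== PORT A =====
-- inner loop: 'for i_bit in range(first_bit, 8): if b & (1 << (7 - i_bit)): return i_byte*8+i_bit'
-- (1 << (7 - i_bit)) ported as (1 : Int) <<< (7 - i_bit).toNat — exact, since every i_bit the
-- loop produces satisfies 0 ≤ i_bit < 8, so 7 - i_bit is a nonnegative shift amount as in Python.
def aInner (b : Int) (i_byte : Int) : List Int → Option Int
  | [] => none
  | i_bit :: rest =>
      if PySem.Int.band b ((1 : Int) <<< (7 - i_bit).toNat) ≠ 0 then some (i_byte * 8 + i_bit)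
      else aInner b i_byte rest

-- outer loop over byte indices, carrying first_bit (reset to 0 after each byte);
-- bytes_array[i_byte] via pyGet?; the none (IndexError) branch is excluded by Pre_.
def aOuter (bytes_array : List Int) : List Int → Int → Int
  | [], _ => -1
  | i_byte :: rest, first_bit =>
      match PySem.List.pyGet? bytes_array i_byte with
      | none => 0  -- IndexError; outside Pre_
      | some b =>
          if b > 0 then
            match aInner b i_byte (PySem.List.pyRange first_bit 8 1) with
            | some r => r
            | none => aOuter bytes_array rest 0
          else aOuter bytes_array rest 0

def index_of_first_bit_in_byte_array (bytes_array : List Int) (start_bit : Int) : Int :=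
  aOuter bytes_array
    (PySem.List.pyRange (PySem.Int.floordiv start_bit 8) (bytes_array.length : Int) 1)
    (PySem.Int.mod start_bit 8)

-- ===== PORT B =====
-- single loop 'for bit in range(start_bit, len*8)'; (1 << (7 - bit % 8)) ported with .toNat,
-- exact since 0 ≤ bit % 8 < 8 in Python.
def bLoop (bytes_array : List Int) : List Int → Int
  | [] => -1
  | bit :: rest =>
      match PySem.List.pyGet? bytes_array (PySem.Int.floordiv bit 8) with
      | none => 0  -- IndexError; outside Pre_
      | some byte =>
          if byte > 0 ∧ PySem.Int.band byte ((1 : Int) <<< (7 - PySem.Int.mod bit 8).toNat) ≠ 0 then bit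
          else bLoop bytes_array rest

def index_of_first_bit_in_byte_array_alt (bytes_array : List Int) (start_bit : Int) : Int :=
  bLoop bytes_array (PySem.List.pyRange start_bit ((bytes_array.length : Int) * 8) 1)

-- ===== PRECONDITION & SPEC =====
-- Pre_ excludes exactly the inputs where A raises IndexError: start_bit//8 below -len makes the
-- first access bytes_array[start_bit//8] go out of range even after negative-index wraparound.
def Pre_index_of_first_bit_in_byte_array (bytes_array : List Int) (start_bit : Int) : Prop :=
  -(bytes_array.length : Int) ≤ PySem.Int.floordiv start_bit 8
instance (bytes_array : List Int) (start_bit : Int) : Decidable (Pre_index_of_first_bit_in_byte_array bytes_array start_bit) := by unfold Pre_index_of_first_bit_in_byte_array; infer_instance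
def pvWitness_index_of_first_bit_in_byte_array : List Int × Int := ([0, 5, 0], 3)

def Spec_index_of_first_bit_in_byte_array (bytes_array : List Int) (start_bit : Int) (out : Int) : Prop := out = index_of_first_bit_in_byte_array_alt bytes_array start_bit
instance (bytes_array : List Int) (start_bit : Int) (out : Int) : Decidable (Spec_index_of_first_bit_in_byte_array bytes_array start_bit out) := by unfold Spec_index_of_first_bit_in_byte_array; infer_instance

-- ===== CLAIM (what is proved, stated in full; the proofs are below) =====
def Claim_equal_index_of_first_bit_in_byte_array : Prop := ∀ (bytes_array : List Int) (start_bit : Int), Dom_index_of_first_bit_in_byte_array bytes_array start_bit → Pre_index_of_first_bit_in_byte_array bytes_array start_bit → Spec_index_of_first_bit_in_byte_array bytes_array start_bit (index_of_first_bit_in_byte_array bytes_array start_bit)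

-- ===== LEMMAS AND PROOFS =====

-- byte/bit decomposition of a flat bit index
theorem fd8 (k i : Int) (h0 : 0 ≤ i) (h8 : i < 8) : PySem.Int.floordiv (8 * k + i) 8 = k := by
  rw [PySem.Int.floordiv_eq_iff_of_pos (by omega)]; omega

theorem md8 (k i : Int) (h0 : 0 ≤ i) (h8 : i < 8) : PySem.Int.mod (8 * k + i) 8 = i := by
  have h := PySem.Int.floordiv_mul_add_mod (8 * k + i) 8
  rw [fd8 k i h0 h8] at h; omega

-- byte b ≤ 0 at index k: B's guard is false on every bit of byte k, so B skips to byte k+1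
theorem bSkip (bytes : List Int) (len : Int) (k b : Int)
    (hb : PySem.List.pyGet? bytes k = some b) (hble : ¬ b > 0) (hkl : k + 1 ≤ len) :
    ∀ (j : Nat) (f : Int), f = 8 - (j : Int) → 0 ≤ f →
      bLoop bytes (PySem.List.pyRange (8 * k + f) (8 * len) 1) =
      bLoop bytes (PySem.List.pyRange (8 * (k + 1)) (8 * len) 1) := by
  intro j
  induction j with
  | zero =>
      intro f hf _
      have : 8 * k + f = 8 * (k + 1) := by omega
      rw [this]
  | succ m ih =>
      intro f hf h0
      have hf8 : f < 8 := by omega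
      have hlt : 8 * k + f < 8 * len := by omega
      rw [PySem.List.pyRange_one_cons hlt]
      simp only [bLoop, fd8 k f h0 hf8, hb]
      rw [if_neg (by simp [hble])]
      have h1 : 8 * k + f + 1 = 8 * k + (f + 1) := by ring
      rw [h1]
      exact ih (f + 1) (by push_cast at hf ⊢; omega) (by omega)

-- byte b > 0 at index k: B over bits 8k+f..8k+7 computes A's inner search, else skips to k+1
theorem bInner (bytes : List Int) (len : Int) (k b : Int)
    (hb : PySem.List.pyGet? bytes k = some b) (hbpos : b > 0) (hkl : k + 1 ≤ len) :
    ∀ (j : Nat) (f : Int), f = 8 - (j : Int) → 0 ≤ f →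
      bLoop bytes (PySem.List.pyRange (8 * k + f) (8 * len) 1) =
      (match aInner b k (PySem.List.pyRange f 8 1) with
       | some r => r
       | none => bLoop bytes (PySem.List.pyRange (8 * (k + 1)) (8 * len) 1)) := by
  intro j
  induction j with
  | zero =>
      intro f hf _
      have hf8 : f = 8 := by omega
      subst hf8
      rw [PySem.List.pyRange_one_eq_nil (a := (8:Int)) (by omega)]
      have : 8 * k + 8 = 8 * (k + 1) := by ring
      rw [this]
      rfl
  | succ m ih =>
      intro f hf h0
      have hf8 : f < 8 := by omega
      have hlt : 8 * k + f < 8 * len := by omega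
      rw [PySem.List.pyRange_one_cons hlt, PySem.List.pyRange_one_cons hf8]
      simp only [bLoop, aInner, fd8 k f h0 hf8, md8 k f h0 hf8, hb]
      by_cases hbit : PySem.Int.band b ((1 : Int) <<< (7 - f).toNat) ≠ 0
      · rw [if_pos ⟨hbpos, hbit⟩, if_pos hbit]
        ring_nf
      · rw [if_neg (by tauto), if_neg (by tauto)]
        have h1 : 8 * k + f + 1 = 8 * k + (f + 1) := by ring
        rw [h1]
        exact ih (f + 1) (by push_cast at hf ⊢; omega) (by omega)

-- pyGet? succeeds on every in-range index
theorem getSome (bytes : List Int) (k : Int)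
    (h1 : -(bytes.length : Int) ≤ k) (h2 : k < (bytes.length : Int)) :
    ∃ b, PySem.List.pyGet? bytes k = some b := by
  cases hg : PySem.List.pyGet? bytes k with
  | some b => exact ⟨b, rfl⟩
  | none =>
      exfalso
      have := (PySem.List.pyGet?_eq_none_iff (xs := bytes) (i := k)).mp hg
      exact this (by simp only [PySem.Raise.InRange]; omega)

-- main induction over bytes: A's outer loop from byte k with first_bit f equals B's flat loop
theorem mainLoop (bytes : List Int) :
    ∀ (j : Nat) (k f : Int), (((bytes.length : Int) - k).toNat = j) →
      -(bytes.length : Int) ≤ k → 0 ≤ f → f < 8 →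
      aOuter bytes (PySem.List.pyRange k (bytes.length : Int) 1) f =
      bLoop bytes (PySem.List.pyRange (8 * k + f) (8 * (bytes.length : Int)) 1) := by
  intro j
  induction j with
  | zero =>
      intro k f hj hk h0 h8
      have hkl : (bytes.length : Int) ≤ k := by omega
      rw [PySem.List.pyRange_one_eq_nil hkl, PySem.List.pyRange_one_eq_nil (by omega)]
      rfl
  | succ m ih =>
      intro k f hj hk h0 h8
      have hkl : k < (bytes.length : Int) := by omega
      obtain ⟨b, hb⟩ := getSome bytes k hk hkl
      rw [PySem.List.pyRange_one_cons hkl]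
      simp only [aOuter, hb]
      by_cases hbpos : b > 0
      · rw [if_pos hbpos,
            bInner bytes (bytes.length : Int) k b hb hbpos (by omega) (8 - f).toNat f
              (by omega) h0]
        cases haI : aInner b k (PySem.List.pyRange f 8 1) with
        | some r => rfl
        | none =>
            have h81 : 8 * (k + 1) = 8 * (k + 1) + 0 := by ring
            rw [h81]
            exact ih (k + 1) 0 (by omega) (by omega) (by omega) (by omega)
      · rw [if_neg hbpos,
            bSkip bytes (bytes.length : Int) k b hb hbpos (by omega) (8 - f).toNat f
              (by omega) h0]
        have h81 : 8 * (k + 1) = 8 * (k + 1) + 0 := by ring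
        rw [h81]
        exact ih (k + 1) 0 (by omega) (by omega) (by omega) (by omega)

-- ===== VERDICT (by name: the statement is the Claim_ definition above) =====
theorem index_of_first_bit_in_byte_array_spec : Claim_equal_index_of_first_bit_in_byte_array := by
  intro bytes_array start_bit _ hpre
  unfold Spec_index_of_first_bit_in_byte_array
  unfold index_of_first_bit_in_byte_array index_of_first_bit_in_byte_array_alt
  unfold Pre_index_of_first_bit_in_byte_array at hpre
  have hstart : 8 * PySem.Int.floordiv start_bit 8 + PySem.Int.mod start_bit 8 = start_bit := by
    have := PySem.Int.floordiv_mul_add_mod start_bit 8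
    omega
  have h0 : 0 ≤ PySem.Int.mod start_bit 8 := PySem.Int.mod_nonneg _ (by omega)
  have h8 : PySem.Int.mod start_bit 8 < 8 := PySem.Int.mod_lt _ (by omega)
  have hmul : (bytes_array.length : Int) * 8 = 8 * (bytes_array.length : Int) := by ring
  rw [hmul]
  conv_rhs => rw [← hstart]
  exact mainLoop bytes_array (((bytes_array.length : Int) - PySem.Int.floordiv start_bit 8).toNat)
    _ _ rfl hpre h0 h8
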